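-- pv_equiv track=rewrite | github.com/kimhons/ai-writing-platform | writecrew-backend/src/agents/structure_architect.py | _analyze_length_distribution
-- ===== SOURCE A (Python) =====
-- from typing import Dict, List, Optional, Any, Tuple
--
-- def _analyze_length_distribution(sentence_lengths: List[int]) -> Dict[str, int]:
--     """Analyze distribution of sentence lengths"""
--     distribution = {
--         'very_short': 0,  # < 5 words
--         'short': 0,       # 5-10 words
--         'medium': 0,      # 11-20 words
--         'long': 0,        # 21-30 words
--         'very_long': 0    # > 30 words
--     }
--
--     for length in sentence_lengths:
--         if length < 5:
--             distribution['very_short'] += 1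
--         elif length <= 10:
--             distribution['short'] += 1
--         elif length <= 20:
--             distribution['medium'] += 1
--         elif length <= 30:
--             distribution['long'] += 1
--         else:
--             distribution['very_long'] += 1
--
--     return distribution
-- ===== SOURCE B (Python) =====
-- def _analyze_length_distribution(sentence_lengths):
--     """Analyze distribution of sentence lengths"""
--     cuts = [5, 11, 21, 31]
--     below = [sum(1 for x in sentence_lengths if x < c) for c in cuts]
--     n = len(sentence_lengths)
--     return {
--         'very_short': below[0],
--         'short': below[1] - below[0],
--         'medium': below[2] - below[1],
--         'long': below[3] - below[2],
--         'very_long': n - below[3],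
--     }
-- ===== Notes on version B (the rewrite author's own statement) =====
-- stated objective: alternative
-- what changed: Replaces the single-pass if/elif increment loop with staged cumulative counting: one counting pass per cutoff computes how many lengths fall below it, and the five bucket counts are obtained by differencing these cumulative counts (no per-element bucket dispatch or mutable counter state).
import Mathlib
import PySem

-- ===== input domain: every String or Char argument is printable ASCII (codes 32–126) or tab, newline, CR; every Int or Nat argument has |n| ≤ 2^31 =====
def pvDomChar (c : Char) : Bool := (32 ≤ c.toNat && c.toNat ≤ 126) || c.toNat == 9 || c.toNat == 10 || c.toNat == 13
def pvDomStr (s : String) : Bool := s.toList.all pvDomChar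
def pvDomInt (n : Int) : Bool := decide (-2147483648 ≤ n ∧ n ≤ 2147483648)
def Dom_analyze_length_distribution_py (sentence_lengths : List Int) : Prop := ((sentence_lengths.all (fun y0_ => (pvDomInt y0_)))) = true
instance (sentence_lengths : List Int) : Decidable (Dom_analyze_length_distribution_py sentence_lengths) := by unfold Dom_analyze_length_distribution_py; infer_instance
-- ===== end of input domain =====

-- B replaces A's single-pass if/elif increment loop with staged cumulative counting passes (count below each cutoff) and differencing (alternative, same cost).

-- ===== PORT A =====
def aldStepA (d : PySem.Dict String Int) (length : Int) : PySem.Dict String Int :=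
  if length < 5 then d.modify "very_short" 0 (· + 1)
  else if length ≤ 10 then d.modify "short" 0 (· + 1)
  else if length ≤ 20 then d.modify "medium" 0 (· + 1)
  else if length ≤ 30 then d.modify "long" 0 (· + 1)
  else d.modify "very_long" 0 (· + 1)

def analyze_length_distribution_py (sentence_lengths : List Int) : List (String × Int) :=
  let distribution : PySem.Dict String Int :=
    PySem.Dict.ofList [("very_short", 0), ("short", 0), ("medium", 0), ("long", 0), ("very_long", 0)]
  (sentence_lengths.foldl aldStepA distribution).items

-- ===== PORT B =====
def aldCuts : List Int := [5, 11, 21, 31]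

-- sum(1 for x in sentence_lengths if x < c)
def aldCntLt (xs : List Int) (c : Int) : Int :=
  ((xs.filter (fun x => x < c)).map (fun _ => (1 : Int))).sum

def analyze_length_distribution_py_alt (sentence_lengths : List Int) : List (String × Int) :=
  let below := aldCuts.map (aldCntLt sentence_lengths)
  let n : Int := sentence_lengths.length
  [("very_short", below.getD 0 0),
   ("short", below.getD 1 0 - below.getD 0 0),
   ("medium", below.getD 2 0 - below.getD 1 0),
   ("long", below.getD 3 0 - below.getD 2 0),
   ("very_long", n - below.getD 3 0)]

-- ===== PRECONDITION & SPEC =====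
def Spec_analyze_length_distribution_py (sentence_lengths : List Int) (out : List (String × Int)) : Prop := out = analyze_length_distribution_py_alt sentence_lengths
instance (sentence_lengths : List Int) (out : List (String × Int)) : Decidable (Spec_analyze_length_distribution_py sentence_lengths out) := by unfold Spec_analyze_length_distribution_py; infer_instance

-- ===== CLAIM =====
def Claim_equal_analyze_length_distribution_py : Prop := ∀ (sentence_lengths : List Int), Dom_analyze_length_distribution_py sentence_lengths → Spec_analyze_length_distribution_py sentence_lengths (analyze_length_distribution_py sentence_lengths)

-- ===== LEMMAS AND PROOFS =====
theorem ald_cnt_cons (x : Int) (xs : List Int) (c : Int) :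
    aldCntLt (x :: xs) c = (if x < c then 1 else 0) + aldCntLt xs c := by
  by_cases h : x < c <;> simp [aldCntLt, h]

-- Invariant: A's fold from an arbitrary 5-entry state equals that state plus B's cumulative-count differences.
theorem ald_fold_eq (l : List Int) : ∀ (a b c d e : Int),
    (l.foldl aldStepA (PySem.Dict.mk [("very_short", a), ("short", b), ("medium", c), ("long", d), ("very_long", e)])).items
      = [("very_short", a + aldCntLt l 5),
         ("short", b + (aldCntLt l 11 - aldCntLt l 5)),
         ("medium", c + (aldCntLt l 21 - aldCntLt l 11)),
         ("long", d + (aldCntLt l 31 - aldCntLt l 21)),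
         ("very_long", e + ((l.length : Int) - aldCntLt l 31))] := by
  induction l with
  | nil =>
    intro a b c d e
    simp [aldCntLt]
  | cons x xs ih =>
    intro a b c d e
    simp only [List.foldl_cons]
    have h5 := ald_cnt_cons x xs 5
    have h11 := ald_cnt_cons x xs 11
    have h21 := ald_cnt_cons x xs 21
    have h31 := ald_cnt_cons x xs 31
    rcases lt_or_ge x 5 with h1 | h1
    · have hA : aldStepA (PySem.Dict.mk [("very_short", a), ("short", b), ("medium", c), ("long", d), ("very_long", e)]) x
          = PySem.Dict.mk [("very_short", a + 1), ("short", b), ("medium", c), ("long", d), ("very_long", e)] := by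
        simp [aldStepA, h1, PySem.Dict.modify, PySem.Dict.contains, PySem.Dict.insert, PySem.Dict.getD, PySem.Dict.get?]
      rw [hA, ih]
      have c5 : x < 11 := by omega
      have c11 : x < 21 := by omega
      have c21 : x < 31 := by omega
      simp only [h5, h11, h21, h31, if_pos h1, if_pos c5, if_pos c11, if_pos c21, List.length_cons]
      simp only [List.cons.injEq, Prod.mk.injEq]
      and_intros <;> first | rfl | (push_cast; try ring)
    · rcases le_or_gt x 10 with h2 | h2
      · have hA : aldStepA (PySem.Dict.mk [("very_short", a), ("short", b), ("medium", c), ("long", d), ("very_long", e)]) x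
            = PySem.Dict.mk [("very_short", a), ("short", b + 1), ("medium", c), ("long", d), ("very_long", e)] := by
          simp [aldStepA, h2, not_lt.mpr h1, PySem.Dict.modify, PySem.Dict.contains, PySem.Dict.insert, PySem.Dict.getD, PySem.Dict.get?]
        rw [hA, ih]
        have n5 : ¬ x < 5 := by omega
        have c5 : x < 11 := by omega
        have c11 : x < 21 := by omega
        have c21 : x < 31 := by omega
        simp only [h5, h11, h21, h31, if_neg n5, if_pos c5, if_pos c11, if_pos c21, List.length_cons]
        simp only [List.cons.injEq, Prod.mk.injEq]
        and_intros <;> first | rfl | (push_cast; try ring)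
      · rcases le_or_gt x 20 with h3 | h3
        · have hA : aldStepA (PySem.Dict.mk [("very_short", a), ("short", b), ("medium", c), ("long", d), ("very_long", e)]) x
              = PySem.Dict.mk [("very_short", a), ("short", b), ("medium", c + 1), ("long", d), ("very_long", e)] := by
            simp [aldStepA, not_lt.mpr h1, not_le.mpr h2, h3, PySem.Dict.modify, PySem.Dict.contains, PySem.Dict.insert, PySem.Dict.getD, PySem.Dict.get?]
          rw [hA, ih]
          have n5 : ¬ x < 5 := by omega
          have n11 : ¬ x < 11 := by omega
          have c11 : x < 21 := by omega
          have c21 : x < 31 := by omega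
          simp only [h5, h11, h21, h31, if_neg n5, if_neg n11, if_pos c11, if_pos c21, List.length_cons]
          simp only [List.cons.injEq, Prod.mk.injEq]
          and_intros <;> first | rfl | (push_cast; try ring)
        · rcases le_or_gt x 30 with h4 | h4
          · have hA : aldStepA (PySem.Dict.mk [("very_short", a), ("short", b), ("medium", c), ("long", d), ("very_long", e)]) x
                = PySem.Dict.mk [("very_short", a), ("short", b), ("medium", c), ("long", d + 1), ("very_long", e)] := by
              simp [aldStepA, not_lt.mpr h1, not_le.mpr h2, not_le.mpr h3, h4, PySem.Dict.modify, PySem.Dict.contains, PySem.Dict.insert, PySem.Dict.getD, PySem.Dict.get?]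
            rw [hA, ih]
            have n5 : ¬ x < 5 := by omega
            have n11 : ¬ x < 11 := by omega
            have n21 : ¬ x < 21 := by omega
            have c21 : x < 31 := by omega
            simp only [h5, h11, h21, h31, if_neg n5, if_neg n11, if_neg n21, if_pos c21, List.length_cons]
            simp only [List.cons.injEq, Prod.mk.injEq]
            and_intros <;> first | rfl | (push_cast; try ring)
          · have hA : aldStepA (PySem.Dict.mk [("very_short", a), ("short", b), ("medium", c), ("long", d), ("very_long", e)]) x
                = PySem.Dict.mk [("very_short", a), ("short", b), ("medium", c), ("long", d), ("very_long", e + 1)] := by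
              simp [aldStepA, not_lt.mpr h1, not_le.mpr h2, not_le.mpr h3, not_le.mpr h4, PySem.Dict.modify, PySem.Dict.contains, PySem.Dict.insert, PySem.Dict.getD, PySem.Dict.get?]
            rw [hA, ih]
            have n5 : ¬ x < 5 := by omega
            have n11 : ¬ x < 11 := by omega
            have n21 : ¬ x < 21 := by omega
            have n31 : ¬ x < 31 := by omega
            simp only [h5, h11, h21, h31, if_neg n5, if_neg n11, if_neg n21, if_neg n31, List.length_cons]
            simp only [List.cons.injEq, Prod.mk.injEq]
            and_intros <;> first | rfl | (push_cast; try ring)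

-- ===== VERDICT =====
theorem analyze_length_distribution_py_spec : Claim_equal_analyze_length_distribution_py := by
  intro xs _
  unfold Spec_analyze_length_distribution_py analyze_length_distribution_py analyze_length_distribution_py_alt
  simp only [aldCuts, List.map, List.getD]
  rw [show PySem.Dict.ofList [("very_short", (0:Int)), ("short", 0), ("medium", 0), ("long", 0), ("very_long", 0)]
        = PySem.Dict.mk [("very_short", 0), ("short", 0), ("medium", 0), ("long", 0), ("very_long", 0)] from by decide]
  rw [ald_fold_eq xs 0 0 0 0 0]
  simp
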